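-- pv_equiv track=rewrite | github.com/MathewPTaylor/VSCode-cause-replit-is-asking-for-money-need-to-make-this-repo-cause-VSCode-wants-me-to-do-it- | rpnbinarytree.py | parse_no_brackets
-- ===== SOURCE A (Python) =====
-- def is_operator(item: str) -> bool:
--     return item == "+" or item == "-" or item == "*" or item == "/"
--
-- precedence_dict = {
--     "+": 1,
--     "-": 1,
--     "*": 2,
--     "/": 2
-- }
--
-- def parse_no_brackets(expression) -> list[str, list, list]:
--     expression_list = expression.split(" ") if type(expression) == str else expression
--     lowest_op_index = len(expression_list)
--     lowest_op_precedence = 3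
--     return_symbol: str
--
--     # this shit basically just parsing at this point
--     # return operator, left expression, right expression
--
--     for i in range(len(expression_list)):
--         if is_operator(expression_list[i]):
--             if precedence_dict[expression_list[i]] < lowest_op_precedence:
--                 lowest_op_index = i
--                 lowest_op_precedence = precedence_dict[expression_list[i]]
--
--     return_symbol = expression_list[lowest_op_index]
--
--     return (return_symbol, expression_list[:lowest_op_index], expression_list[lowest_op_index + 1:])
-- ===== SOURCE B (Python) =====
-- def _find_first(toks, ops):
--     """Return (index, token) of the leftmost token in ops, or None."""
--     for i, t in enumerate(toks):
--         if t in ops: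
--             return i, t
--     return None
--
--
-- def parse_no_brackets(expression) -> list[str, list, list]:
--     toks = expression.split(" ") if type(expression) == str else expression
--     # tiered scan: lowest-precedence tier first (+/-), then (*//)
--     hit = _find_first(toks, ("+", "-")) or _find_first(toks, ("*", "/"))
--     if hit is None:
--         raise IndexError("expression contains no operator")
--     i, op = hit
--     return (op, toks[:i], toks[i + 1:])
-- ===== Notes on version B (the rewrite author's own statement) =====
-- stated objective: simpler
-- what changed: Replaces the running-minimum-precedence scan (tracking lowest_op_index/lowest_op_precedence over a precedence dict) with a tiered search: find the leftmost '+'/'-', and only if none exists the leftmost '*'/'/', returning at the first hit.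
import Mathlib
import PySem

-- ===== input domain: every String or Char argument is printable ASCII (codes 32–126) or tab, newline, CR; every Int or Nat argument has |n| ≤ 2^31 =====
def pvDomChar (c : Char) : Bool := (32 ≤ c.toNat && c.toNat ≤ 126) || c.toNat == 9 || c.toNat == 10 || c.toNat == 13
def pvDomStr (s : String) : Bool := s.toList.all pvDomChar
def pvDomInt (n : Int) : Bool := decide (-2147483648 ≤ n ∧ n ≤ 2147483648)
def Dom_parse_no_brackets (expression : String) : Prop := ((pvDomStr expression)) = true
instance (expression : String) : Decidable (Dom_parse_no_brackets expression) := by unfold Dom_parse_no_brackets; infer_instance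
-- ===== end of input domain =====

-- B replaces A's running-minimum-precedence scan with a tiered leftmost search (simpler); return values only.

-- ===== PORT A =====
def is_operator (item : String) : Bool :=
  item == "+" || item == "-" || item == "*" || item == "/"

def precedence_dict : PySem.Dict String Int :=
  PySem.Dict.ofList [("+", 1), ("-", 1), ("*", 2), ("/", 2)]

-- the body of A's for-loop, over state (lowest_op_index, lowest_op_precedence)
def pvStepA (s : Int × Int) (p : Int × String) : Int × Int :=
  if is_operator p.2 then
    if precedence_dict.getD p.2 0 < s.2 then (p.1, precedence_dict.getD p.2 0) else s
  else s

def parse_no_brackets (expression : String) : String × List String × List String :=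
  let expression_list := (PySem.Str.split? expression " ").getD []
  let st := (PySem.List.enumerate expression_list 0).foldl pvStepA
      ((expression_list.length : Int), (3 : Int))
  (PySem.List.pyGetD expression_list st.1 "",
   PySem.List.slice expression_list none (some st.1),
   PySem.List.slice expression_list (some (st.1 + 1)) none)

-- ===== PORT B =====
-- Source B's _find_first: leftmost token belonging to ops, with its index
def find_first_aux (i : Int) (toks ops : List String) : Option (Int × String) :=
  match toks with
  | [] => none
  | t :: ts => if ops.contains t then some (i, t) else find_first_aux (i + 1) ts ops

def parse_no_brackets_alt (expression : String) : String × List String × List String :=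
  let toks := (PySem.Str.split? expression " ").getD []
  -- 'hit = _find_first(toks, ("+","-")) or _find_first(toks, ("*","/"))'
  let hit := match find_first_aux 0 toks ["+", "-"] with
    | some h => some h
    | none => find_first_aux 0 toks ["*", "/"]
  match hit with
  | some (i, op) =>
      (op, PySem.List.slice toks none (some i), PySem.List.slice toks (some (i + 1)) none)
  | none => ("", [], [])   -- Source B raises IndexError here; outside Pre_

-- ===== PRECONDITION & SPEC =====
-- Pre_ excludes exactly the inputs whose space-split tokens contain no operator,
-- where A raises IndexError (and B raises IndexError too).
def Pre_parse_no_brackets (expression : String) : Prop :=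
  ∃ t ∈ (PySem.Str.split? expression " ").getD [], t ∈ (["+", "-", "*", "/"] : List String)
instance (expression : String) : Decidable (Pre_parse_no_brackets expression) := by
  unfold Pre_parse_no_brackets; infer_instance
def pvWitness_parse_no_brackets : String := "1 + 2 * 3"

def Spec_parse_no_brackets (expression : String) (out : String × List String × List String) : Prop := out = parse_no_brackets_alt expression
instance (expression : String) (out : String × List String × List String) : Decidable (Spec_parse_no_brackets expression out) := by unfold Spec_parse_no_brackets; infer_instance

-- ===== CLAIM (what is proved, stated in full; the proofs are below) =====
def Claim_equal_parse_no_brackets : Prop := ∀ (expression : String), Dom_parse_no_brackets expression → Pre_parse_no_brackets expression → Spec_parse_no_brackets expression (parse_no_brackets expression)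

-- ===== LEMMAS AND PROOFS =====

theorem op_cases {t : String} (h : is_operator t = true) :
    t = "+" ∨ t = "-" ∨ t = "*" ∨ t = "/" := by
  simp [is_operator] at h; tauto

theorem isop_plus : is_operator "+" = true := by decide
theorem isop_minus : is_operator "-" = true := by decide
theorem isop_mul : is_operator "*" = true := by decide
theorem isop_div : is_operator "/" = true := by decide
theorem getD_plus : precedence_dict.getD "+" 0 = 1 := by decide
theorem getD_minus : precedence_dict.getD "-" 0 = 1 := by decide
theorem getD_mul : precedence_dict.getD "*" 0 = 2 := by decide
theorem getD_div : precedence_dict.getD "/" 0 = 2 := by decide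

-- once the precedence reaches 1, the fold never changes the state again
theorem fold_one (toks : List String) : ∀ (k i : Int),
    (PySem.List.enumerate toks k).foldl pvStepA (i, 1) = (i, 1) := by
  induction toks with
  | nil => intro k i; simp [PySem.List.enumerate_nil]
  | cons t ts ih =>
    intro k i
    rw [PySem.List.enumerate_cons, List.foldl_cons]
    have hstep : pvStepA (i, 1) (k, t) = (i, 1) := by
      by_cases h : is_operator t = true
      · rcases op_cases h with h1 | h1 | h1 | h1 <;> subst h1 <;>
          simp [pvStepA, isop_plus, isop_minus, isop_mul, isop_div,
                getD_plus, getD_minus, getD_mul, getD_div]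
      · simp [pvStepA, h]
    rw [hstep, ih]

-- with precedence 2, the fold finds the leftmost '+'/'-' (or stays put)
theorem fold_two (toks : List String) : ∀ (k i : Int),
    (PySem.List.enumerate toks k).foldl pvStepA (i, 2) =
      (match find_first_aux k toks ["+", "-"] with
       | some (j, _) => (j, 1)
       | none => (i, 2)) := by
  induction toks with
  | nil => intro k i; simp [PySem.List.enumerate_nil, find_first_aux]
  | cons t ts ih =>
    intro k i
    rw [PySem.List.enumerate_cons, List.foldl_cons]
    by_cases hpm : t = "+" ∨ t = "-"
    · have hstep : pvStepA (i, 2) (k, t) = (k, 1) := by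
        rcases hpm with h | h <;> subst h <;>
          simp [pvStepA, isop_plus, isop_minus, getD_plus, getD_minus]
      have hf : find_first_aux k (t :: ts) ["+", "-"] = some (k, t) := by
        rcases hpm with h | h <;> subst h <;> simp [find_first_aux]
      rw [hstep, fold_one, hf]
    · have hstep : pvStepA (i, 2) (k, t) = (i, 2) := by
        by_cases h : is_operator t = true
        · rcases op_cases h with h1 | h1 | h1 | h1
          · exact absurd (Or.inl h1) hpm
          · exact absurd (Or.inr h1) hpm
          · subst h1; simp [pvStepA, isop_mul, getD_mul]
          · subst h1; simp [pvStepA, isop_div, getD_div]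
        · simp [pvStepA, h]
      have hf : find_first_aux k (t :: ts) ["+", "-"] = find_first_aux (k + 1) ts ["+", "-"] := by
        simp [find_first_aux]; tauto
      rw [hstep, ih, hf]

-- from the initial state (·, 3) the fold performs the tiered selection
theorem fold_three (toks : List String) : ∀ (k i : Int),
    (PySem.List.enumerate toks k).foldl pvStepA (i, 3) =
      (match find_first_aux k toks ["+", "-"] with
       | some (j, _) => (j, 1)
       | none =>
         match find_first_aux k toks ["*", "/"] with
         | some (j, _) => (j, 2)
         | none => (i, 3)) := by
  induction toks with
  | nil => intro k i; simp [PySem.List.enumerate_nil, find_first_aux]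
  | cons t ts ih =>
    intro k i
    rw [PySem.List.enumerate_cons, List.foldl_cons]
    by_cases hpm : t = "+" ∨ t = "-"
    · have hstep : pvStepA (i, 3) (k, t) = (k, 1) := by
        rcases hpm with h | h <;> subst h <;>
          simp [pvStepA, isop_plus, isop_minus, getD_plus, getD_minus]
      have hf : find_first_aux k (t :: ts) ["+", "-"] = some (k, t) := by
        rcases hpm with h | h <;> subst h <;> simp [find_first_aux]
      rw [hstep, fold_one, hf]
    · have hfpm : find_first_aux k (t :: ts) ["+", "-"] = find_first_aux (k + 1) ts ["+", "-"] := by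
        simp [find_first_aux]; tauto
      by_cases hmd : t = "*" ∨ t = "/"
      · have hstep : pvStepA (i, 3) (k, t) = (k, 2) := by
          rcases hmd with h | h <;> subst h <;>
            simp [pvStepA, isop_mul, isop_div, getD_mul, getD_div]
        have hfm : find_first_aux k (t :: ts) ["*", "/"] = some (k, t) := by
          rcases hmd with h | h <;> subst h <;> simp [find_first_aux]
        rw [hstep, fold_two, hfpm, hfm]
      · have hstep : pvStepA (i, 3) (k, t) = (i, 3) := by
          by_cases h : is_operator t = true
          · rcases op_cases h with h1 | h1 | h1 | h1
            · exact absurd (Or.inl h1) hpm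
            · exact absurd (Or.inr h1) hpm
            · exact absurd (Or.inl h1) hmd
            · exact absurd (Or.inr h1) hmd
          · simp [pvStepA, h]
        have hfm : find_first_aux k (t :: ts) ["*", "/"] = find_first_aux (k + 1) ts ["*", "/"] := by
          simp [find_first_aux]; tauto
        rw [hstep, ih, hfpm, hfm]

-- a hit of find_first_aux is a genuine in-range index carrying its token
theorem find_some (toks : List String) : ∀ (ops : List String) (k j : Int) (t : String),
    find_first_aux k toks ops = some (j, t) →
    ∃ m : Nat, j = k + (m : Int) ∧ toks[m]? = some t := by
  induction toks with
  | nil => intro ops k j t h; simp [find_first_aux] at h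
  | cons x xs ih =>
    intro ops k j t h
    by_cases hc : x ∈ ops
    · simp [find_first_aux, hc] at h
      obtain ⟨h1, rfl⟩ := h
      exact ⟨0, by omega, by simp⟩
    · simp [find_first_aux, hc] at h
      obtain ⟨m, hm, hg⟩ := ih ops (k + 1) j t h
      exact ⟨m + 1, by push_cast at hm ⊢; omega, by simpa using hg⟩

theorem find_none (toks : List String) : ∀ (ops : List String) (k : Int),
    find_first_aux k toks ops = none → ∀ t ∈ toks, ¬ t ∈ ops := by
  induction toks with
  | nil => intro ops k _ t ht; simp at ht
  | cons x xs ih =>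
    intro ops k h t ht
    by_cases hc : x ∈ ops
    · simp [find_first_aux, hc] at h
    · rcases List.mem_cons.mp ht with rfl | htt
      · exact hc
      · exact ih ops (k + 1) (by simpa [find_first_aux, hc] using h) t htt

-- ===== VERDICT (by name: the statement is the Claim_ definition above) =====
theorem parse_no_brackets_spec : Claim_equal_parse_no_brackets := by
  intro expression _hdom hpre
  unfold Spec_parse_no_brackets parse_no_brackets parse_no_brackets_alt
  set toks := (PySem.Str.split? expression " ").getD [] with htoks
  simp only [fold_three]
  rcases hpm : find_first_aux 0 toks ["+", "-"] with _ | ⟨j, t⟩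
  · rcases hmd : find_first_aux 0 toks ["*", "/"] with _ | ⟨j, t⟩
    · -- no operator at all: contradicts Pre_
      exfalso
      obtain ⟨t, ht, hmem⟩ := hpre
      rw [← htoks] at ht
      simp at hmem
      rcases hmem with h | h | h | h
      · exact find_none toks _ 0 hpm t ht (by simp [h])
      · exact find_none toks _ 0 hpm t ht (by simp [h])
      · exact find_none toks _ 0 hmd t ht (by simp [h])
      · exact find_none toks _ 0 hmd t ht (by simp [h])
    · obtain ⟨m, hm, hg⟩ := find_some toks _ 0 j t hmd
      have hj : j = (m : Int) := by omega
      subst hj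
      have hget : PySem.List.pyGetD toks (m : Int) "" = t := by
        simp [PySem.List.pyGetD_natCast, List.getD, hg]
      simp only [hget]
  · obtain ⟨m, hm, hg⟩ := find_some toks _ 0 j t hpm
    have hj : j = (m : Int) := by omega
    subst hj
    have hget : PySem.List.pyGetD toks (m : Int) "" = t := by
      simp [PySem.List.pyGetD_natCast, List.getD, hg]
    simp only [hget]
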